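-- pv_equiv track=rewrite | github.com/Joolaa/dm-grp-work | algorithms.py | support_count_sequence
-- ===== SOURCE A (Python) =====
-- def support_count_sequence(x, transactions):
--     count = 0
--     for sequence in transactions:
--         i = 0
--         for element in sequence:
--             if i == len(x):
--                 break
--             if set(x[i]) <= element:
--                 i += 1
--         count += (i == len(x))
--     return count
-- ===== SOURCE B (Python) =====
-- def support_count_sequence(x, transactions):
--     # Match the pattern back-to-front: scan each transaction right-to-left,
--     # peeling off the (reversed) pattern's element-sets from a 'need' list.
--     # Correct because a greedy subsequence embedding exists in one direction
--     # iff it exists in the other.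
--     rtargets = [set(xi) for xi in reversed(x)]
--     count = 0
--     for sequence in transactions:
--         need = rtargets
--         for element in reversed(sequence):
--             if need and need[0] <= element:
--                 need = need[1:]
--         count += not need
--     return count
-- ===== Notes on version B (the rewrite author's own statement) =====
-- stated objective: alternative
-- what changed: B matches the pattern back-to-front: it builds the pattern's element-sets once in reversed order and scans each transaction right-to-left, peeling matched sets off a 'need' list, instead of A's left-to-right scan with an explicit index into the pattern, a break, and set(x[i]) rebuilt at every element; equivalence rests on the proved fact that a greedy subsequence embedding exists in one direction iff it exists in the other.
import Mathlib
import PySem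

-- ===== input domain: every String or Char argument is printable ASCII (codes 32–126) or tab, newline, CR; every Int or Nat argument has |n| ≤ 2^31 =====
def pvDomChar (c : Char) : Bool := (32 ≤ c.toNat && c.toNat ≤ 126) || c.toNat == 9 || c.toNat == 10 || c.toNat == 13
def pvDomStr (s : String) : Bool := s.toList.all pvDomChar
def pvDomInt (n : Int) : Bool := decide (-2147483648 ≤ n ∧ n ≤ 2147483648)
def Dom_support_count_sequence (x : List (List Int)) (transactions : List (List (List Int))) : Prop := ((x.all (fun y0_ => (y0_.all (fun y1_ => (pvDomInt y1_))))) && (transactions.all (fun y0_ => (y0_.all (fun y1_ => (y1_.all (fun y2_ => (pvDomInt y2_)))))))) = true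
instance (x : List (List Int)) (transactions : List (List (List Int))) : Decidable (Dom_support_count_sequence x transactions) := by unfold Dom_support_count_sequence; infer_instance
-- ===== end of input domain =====

-- B matches the pattern back-to-front over the reversed transaction (pattern sets built once),
-- a different traversal order than A's forward indexed greedy scan; objective: alternative.


-- ===== PORT A =====
-- inner loop: for element in sequence: if i == len(x): break; if set(x[i]) <= element: i += 1
-- (the break is modelled by the saturating first branch: once i = len(x) it never changes)
def pvStepA (x : List (List Int)) (i : Nat) (element : List Int) : Nat :=
  if i = x.length then i
  else if PySem.Set.issubset (PySem.Set.ofList (x.getD i [])) element then i + 1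
  else i

def support_count_sequence (x : List (List Int)) (transactions : List (List (List Int))) : Int :=
  transactions.foldl (fun count sequence =>
    let i := sequence.foldl (pvStepA x) 0
    count + (if i = x.length then 1 else 0)) 0

-- ===== PORT B =====
-- inner loop: for element in reversed(sequence): if need and need[0] <= element: need = need[1:]
def pvStepB (need : List (PySem.Set Int)) (element : List Int) : List (PySem.Set Int) :=
  match need with
  | [] => []
  | t :: rest => if PySem.Set.issubset t element then rest else t :: rest

def support_count_sequence_alt (x : List (List Int)) (transactions : List (List (List Int))) : Int :=
  let rtargets := x.reverse.map PySem.Set.ofList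
  transactions.foldl (fun count sequence =>
    let need := sequence.reverse.foldl pvStepB rtargets
    count + (if need = [] then 1 else 0)) 0

-- ===== PRECONDITION & SPEC =====
def Spec_support_count_sequence (x : List (List Int)) (transactions : List (List (List Int))) (out : Int) : Prop := out = support_count_sequence_alt x transactions
instance (x : List (List Int)) (transactions : List (List (List Int))) (out : Int) : Decidable (Spec_support_count_sequence x transactions out) := by unfold Spec_support_count_sequence; infer_instance

-- ===== CLAIM (what is proved, stated in full; the proofs are below) =====
def Claim_equal_support_count_sequence : Prop := ∀ (x : List (List Int)) (transactions : List (List (List Int))), Dom_support_count_sequence x transactions → Spec_support_count_sequence x transactions (support_count_sequence x transactions)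

-- ===== LEMMAS AND PROOFS =====

-- greedy list-state scan: peel off the head target whenever it is a subset of the element
def pvGreedy (ts : List (PySem.Set Int)) (s : List (List Int)) : Bool :=
  decide (s.foldl pvStepB ts = [])

-- an order-respecting embedding of the targets into the sequence exists
def pvEmbeds (ts : List (PySem.Set Int)) (s : List (List Int)) : Prop :=
  ∃ u, u.Sublist s ∧ List.Forall₂ (fun t e => PySem.Set.issubset t e = true) ts u

-- the empty target list stays matched
lemma pv_foldl_nil (l : List (List Int)) : l.foldl pvStepB [] = [] := by
  induction l with
  | nil => rfl
  | cons a l ihl => simpa [pvStepB] using ihl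

-- A's indexed greedy scan agrees with the list-state greedy scan on the mapped targets
lemma pv_A_eq_greedy (x : List (List Int)) (seq : List (List Int)) :
    ∀ i : Nat, i ≤ x.length →
    (decide (seq.foldl (pvStepA x) i = x.length))
      = pvGreedy ((x.map PySem.Set.ofList).drop i) seq := by
  induction seq with
  | nil =>
    intro i hi
    simp only [List.foldl_nil, pvGreedy]
    by_cases h : i = x.length
    · subst h
      have hd : (x.map PySem.Set.ofList).drop x.length = [] :=
        List.drop_eq_nil_of_le (by simp)
      simp [hd]
    · have hlt : i < x.length := lt_of_le_of_ne hi h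
      have hdrop : (x.map PySem.Set.ofList).drop i
          = PySem.Set.ofList x[i] :: (x.map PySem.Set.ofList).drop (i + 1) := by
        rw [List.drop_eq_getElem_cons (by simpa using hlt)]
        simp
      simp [hdrop, h]
  | cons el rest ih =>
    intro i hi
    simp only [List.foldl_cons]
    by_cases h : i = x.length
    · subst h
      have hstep : pvStepA x x.length el = x.length := by
        unfold pvStepA; rw [if_pos rfl]
      have hd : (x.map PySem.Set.ofList).drop x.length = [] :=
        List.drop_eq_nil_of_le (by simp)
      simp only [hstep]
      rw [ih _ le_rfl, hd]
      simp [pvGreedy, List.foldl_cons, pvStepB, pv_foldl_nil]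
    · have hlt : i < x.length := lt_of_le_of_ne hi h
      have hdrop : (x.map PySem.Set.ofList).drop i
          = PySem.Set.ofList x[i] :: (x.map PySem.Set.ofList).drop (i + 1) := by
        rw [List.drop_eq_getElem_cons (by simpa using hlt)]
        simp
      have hget : x.getD i [] = x[i] := by
        simp [List.getD_eq_getElem?_getD, List.getElem?_eq_getElem hlt]
      by_cases hs : PySem.Set.issubset (PySem.Set.ofList (x.getD i [])) el = true
      · have hstep : pvStepA x i el = i + 1 := by
          unfold pvStepA; rw [if_neg h, if_pos hs]
        simp only [hstep]
        rw [ih _ (by omega), hdrop]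
        have hs' : PySem.Set.issubset (PySem.Set.ofList x[i]) el = true := hget ▸ hs
        simp [pvGreedy, List.foldl_cons, pvStepB, hs']
      · have hstep : pvStepA x i el = i := by
          unfold pvStepA; rw [if_neg h, if_neg hs]
        simp only [hstep]
        rw [ih _ hi, hdrop]
        have hs' : ¬ PySem.Set.issubset (PySem.Set.ofList x[i]) el = true := hget ▸ hs
        simp only [pvGreedy, List.foldl_cons, pvStepB, if_neg hs']

-- dropping the first target preserves embeddability
lemma pv_embeds_mono {t : PySem.Set Int} {ts : List (PySem.Set Int)} {s : List (List Int)} :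
    pvEmbeds (t :: ts) s -> pvEmbeds ts s := by
  rintro ⟨u, hu, hf⟩
  cases hf with
  | cons hte hf' => exact ⟨_, (List.sublist_cons_self _ _).trans hu, hf'⟩

-- the greedy scan succeeds exactly when an embedding exists
lemma pv_greedy_iff_embeds (s : List (List Int)) :
    ∀ ts, pvGreedy ts s = true ↔ pvEmbeds ts s := by
  induction s with
  | nil =>
    intro ts
    cases ts with
    | nil =>
      constructor
      · intro _; exact ⟨[], List.nil_sublist _, List.Forall₂.nil⟩
      · intro _; simp [pvGreedy]
    | cons t ts' =>
      simp only [pvGreedy, List.foldl_nil]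
      constructor
      · intro h; simp at h
      · rintro ⟨u, hu, hf⟩
        rcases List.sublist_nil.mp hu with rfl
        cases hf
  | cons e s' ih =>
    intro ts
    cases ts with
    | nil =>
      constructor
      · intro _; exact ⟨[], List.nil_sublist _, List.Forall₂.nil⟩
      · intro _
        simp [pvGreedy, List.foldl_cons, pvStepB, pv_foldl_nil]
    | cons t ts' =>
      by_cases hs : PySem.Set.issubset t e = true
      · have hg : pvGreedy (t :: ts') (e :: s') = pvGreedy ts' s' := by
          simp [pvGreedy, List.foldl_cons, pvStepB, hs]
        rw [hg, ih ts']
        constructor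
        · rintro ⟨u, hu, hf⟩
          exact ⟨e :: u, List.Sublist.cons₂ e hu, List.Forall₂.cons hs hf⟩
        · rintro ⟨u, hu, hf⟩
          cases hu with
          | cons _ hu' => exact pv_embeds_mono ⟨u, hu', hf⟩
          | cons₂ _ hu' =>
            cases hf with
            | cons hte hf' => exact ⟨_, hu', hf'⟩
      · have hg : pvGreedy (t :: ts') (e :: s') = pvGreedy (t :: ts') s' := by
          simp only [pvGreedy, List.foldl_cons, pvStepB, if_neg hs]
        rw [hg, ih (t :: ts')]
        constructor
        · rintro ⟨u, hu, hf⟩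
          exact ⟨u, hu.trans (List.sublist_cons_self _ _), hf⟩
        · rintro ⟨u, hu, hf⟩
          cases hu with
          | cons _ hu' => exact ⟨u, hu', hf⟩
          | cons₂ _ hu' =>
            cases hf with
            | cons hte hf' => exact absurd hte hs

-- embeddings reverse
lemma pv_embeds_reverse (ts : List (PySem.Set Int)) (s : List (List Int)) :
    pvEmbeds ts s ↔ pvEmbeds ts.reverse s.reverse := by
  constructor
  · rintro ⟨u, hu, hf⟩
    exact ⟨u.reverse, hu.reverse, List.forall₂_reverse_iff.mpr hf⟩
  · rintro ⟨u, hu, hf⟩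
    refine ⟨u.reverse, ?_, ?_⟩
    · simpa using hu.reverse
    · simpa using List.forall₂_reverse_iff.mpr hf

-- per-transaction: A's forward indexed scan agrees with B's backward list-state scan
lemma pv_seq_eq (x : List (List Int)) (seq : List (List Int)) :
    (if seq.foldl (pvStepA x) 0 = x.length then (1 : Int) else 0)
      = (if seq.reverse.foldl pvStepB (x.reverse.map PySem.Set.ofList) = [] then 1 else 0) := by
  have h1 := pv_A_eq_greedy x seq 0 (Nat.zero_le _)
  simp only [List.drop_zero] at h1
  have h2 : pvGreedy (x.map PySem.Set.ofList) seq = true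
      ↔ pvGreedy (x.reverse.map PySem.Set.ofList) seq.reverse = true := by
    rw [pv_greedy_iff_embeds, pv_greedy_iff_embeds, pv_embeds_reverse, List.map_reverse]
  have h3 : (seq.foldl (pvStepA x) 0 = x.length)
      ↔ (seq.reverse.foldl pvStepB (x.reverse.map PySem.Set.ofList) = []) := by
    constructor
    · intro h
      have : pvGreedy (x.map PySem.Set.ofList) seq = true := by rw [← h1]; simpa using h
      simpa [pvGreedy, decide_eq_true_eq] using h2.mp this
    · intro h
      have : pvGreedy (x.reverse.map PySem.Set.ofList) seq.reverse = true := by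
        unfold pvGreedy; exact decide_eq_true h
      have := h2.mpr this
      rw [← h1] at this
      simpa using this
  split_ifs with ha hb hb
  · rfl
  · exact absurd (h3.mp ha) hb
  · exact absurd (h3.mpr hb) ha
  · rfl

lemma pv_fold_eq (x : List (List Int)) (transactions : List (List (List Int))) :
    ∀ c : Int,
    transactions.foldl (fun count sequence =>
      let i := sequence.foldl (pvStepA x) 0
      count + (if i = x.length then 1 else 0)) c
    = transactions.foldl (fun count sequence =>
        let need := sequence.reverse.foldl pvStepB (x.reverse.map PySem.Set.ofList)
        count + (if need = [] then 1 else 0)) c := by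
  induction transactions with
  | nil => intro c; rfl
  | cons seq rest ih =>
    intro c
    simp only [List.foldl_cons]
    rw [ih]
    congr 2
    exact pv_seq_eq x seq

-- ===== VERDICT (by name: the statement is the Claim_ definition above) =====
theorem support_count_sequence_spec : Claim_equal_support_count_sequence := by
  intro x transactions _
  unfold Spec_support_count_sequence support_count_sequence support_count_sequence_alt
  exact pv_fold_eq x transactions 0
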